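-- pv_equiv track=rewrite | github.com/falconjhc/W-Net | EvaluationScripts/EvalLineGraphScript.py | find_real_exp_num
-- ===== SOURCE A (Python) =====
-- checking_dataset = 'StyleHw50'
--
-- checking_mode = 'ContentUnKnown-StyleUnKnown'
--
-- def find_real_exp_num(exp_list):
--     valid_exp_name_list = list()
--     exp_full_list = list()
--     for exp in exp_list:
--         exp_name = exp
--         if not (('WNet' in exp_name) and (checking_dataset in exp_name) and (checking_mode in exp_name)):
--             continue
--         keyword_find = [ii for ii in range(len(exp_name)) if exp_name.startswith('Style', ii)]
--         for keyword in keyword_find: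
--             keyword_str = exp_name[keyword:keyword + 7]
--             if keyword_str[-1].isdigit():
--                 style_info = keyword_str
--                 break
--         exp_name_modified = exp_name.replace(style_info,'')
--         if not exp_name_modified in valid_exp_name_list:
--             valid_exp_name_list.append(exp_name_modified)
--             exp_full_list.append(list())
--             exp_full_list[-1].append(exp_name)
--         else:
--             found_index = valid_exp_name_list.index(exp_name_modified)
--             exp_full_list[found_index].append(exp_name)
--     return exp_full_list,valid_exp_name_list
-- ===== SOURCE B (Python) =====
-- checking_dataset = 'StyleHw50'
--
-- checking_mode = 'ContentUnKnown-StyleUnKnown'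
--
-- def _style_key(exp_name):
--     # strip the first digit-terminated 'Style' marker from the name
--     for ii in range(len(exp_name)):
--         if exp_name.startswith('Style', ii):
--             chunk = exp_name[ii:ii + 7]
--             if chunk[-1].isdigit():
--                 return exp_name.replace(chunk, '')
--     raise ValueError('no style marker in ' + exp_name)
--
-- def find_real_exp_num(exp_list):
--     tagged = [(_style_key(e), e) for e in exp_list
--               if 'WNet' in e and checking_dataset in e and checking_mode in e]
--     keys = list(dict.fromkeys(k for k, _ in tagged))
--     return [[e for k2, e in tagged if k2 == k] for k in keys], keys
-- ===== Notes on version B (the rewrite author's own statement) =====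
-- stated objective: alternative
-- what changed: A's single incremental pass that grows two parallel lists via an in/index membership branch is replaced by staged passes: tag each surviving name with its marker-stripped key via a pure helper, dedupe the keys with dict.fromkeys, then extract each group by filtering the tagged pairs per key.
import Mathlib
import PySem

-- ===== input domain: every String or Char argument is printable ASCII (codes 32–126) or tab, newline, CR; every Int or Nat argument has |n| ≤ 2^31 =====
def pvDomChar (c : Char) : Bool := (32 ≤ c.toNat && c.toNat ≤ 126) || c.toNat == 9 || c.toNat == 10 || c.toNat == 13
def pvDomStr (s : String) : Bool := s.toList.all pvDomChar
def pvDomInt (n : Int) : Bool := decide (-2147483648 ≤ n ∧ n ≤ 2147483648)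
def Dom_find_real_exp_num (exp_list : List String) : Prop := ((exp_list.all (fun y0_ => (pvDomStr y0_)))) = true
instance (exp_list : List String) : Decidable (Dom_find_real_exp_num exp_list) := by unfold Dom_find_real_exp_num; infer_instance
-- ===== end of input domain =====

-- B replaces A's incremental parallel-list grouping (membership/index branch) by staged passes:
-- tag each surviving name with its marker-stripped key, dedupe the keys, then extract each group
-- by filtering the tagged pairs per key; objective: alternative (same order of cost).

-- ===== PORT A =====
-- loop body of A's 'for exp in exp_list'; state = ((exp_full_list, valid_exp_name_list), style_info)
-- (style_info is a Python local that persists across iterations: Option String, none = not yet bound)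
def pvStepA (st : (List (List String) × List String) × Option String) (exp : String) :
    (List (List String) × List String) × Option String :=
  if !(PySem.Str.isIn "WNet" exp && PySem.Str.isIn "StyleHw50" exp
        && PySem.Str.isIn "ContentUnKnown-StyleUnKnown" exp) then st
  else
    -- keyword_find = [ii for ii in range(len(exp_name)) if exp_name.startswith('Style', ii)]
    -- (startswith with offset ii, 0 ≤ ii < len, is exactly startswith on the slice exp[ii:])
    let keyword_find := (List.range exp.toList.length).filter
      (fun (ii : Nat) => PySem.Str.startswith (PySem.Str.slice exp (some (ii : Int)) none) "Style")
    -- for keyword in keyword_find: keyword_str = exp[keyword:keyword+7]; if keyword_str[-1].isdigit(): style_info = keyword_str; break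
    let style' := match keyword_find.find? (fun (k : Nat) =>
        match PySem.Str.pyGet? (PySem.Str.slice exp (some (k : Int)) (some ((k : Int) + 7))) (-1) with
        | some c => PySem.Chars.isdigit c
        | none => false) with
      | some k => some (PySem.Str.slice exp (some (k : Int)) (some ((k : Int) + 7)))
      | none => st.2
    match style' with
    | none => st   -- Python raises UnboundLocalError here (style_info never bound); excluded by Pre_
    | some style_info =>
      let modified := PySem.Str.replace exp style_info ""
      if !(st.1.2.contains modified) then
        ((st.1.1 ++ [[exp]], st.1.2 ++ [modified]), style')
      else
        match PySem.List.index? st.1.2 modified with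
        | some found_index => ((st.1.1.modify found_index (· ++ [exp]), st.1.2), style')
        | none => (st.1, style')   -- unreachable: membership just checked

def find_real_exp_num (exp_list : List String) : List (List String) × List String :=
  (exp_list.foldl pvStepA (([], []), none)).1

-- ===== PORT B =====
-- _style_key: first ii with exp_name.startswith('Style', ii) whose 7-char chunk ends in a digit;
-- returns the name with that chunk stripped. none = B's 'raise ValueError' (excluded by Pre_).
def pvStyleKey? (exp_name : String) : Option String :=
  (List.range exp_name.toList.length).findSome? (fun (ii : Nat) =>
    if PySem.Str.startswith (PySem.Str.slice exp_name (some (ii : Int)) none) "Style" then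
      match PySem.Str.pyGet? (PySem.Str.slice exp_name (some (ii : Int)) (some ((ii : Int) + 7))) (-1) with
      | some c =>
        if PySem.Chars.isdigit c then
          some (PySem.Str.replace exp_name (PySem.Str.slice exp_name (some (ii : Int)) (some ((ii : Int) + 7))) "")
        else none
      | none => none   -- IndexError on an empty chunk: unreachable, ii < len
    else none)

def pvSurvives (e : String) : Bool :=
  PySem.Str.isIn "WNet" e && PySem.Str.isIn "StyleHw50" e && PySem.Str.isIn "ContentUnKnown-StyleUnKnown" e

def find_real_exp_num_alt (exp_list : List String) : List (List String) × List String :=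
  -- tagged = [(_style_key(e), e) for e in exp_list if 'WNet' in e and ...]
  -- (getD "" stands for _style_key's ValueError: never reached inside Pre_)
  let tagged := (exp_list.filter pvSurvives).map (fun e => ((pvStyleKey? e).getD "", e))
  -- keys = list(dict.fromkeys(k for k, _ in tagged))
  let keys := PySem.List.dedup (tagged.map Prod.fst)
  -- return [[e for k2, e in tagged if k2 == k] for k in keys], keys
  (keys.map (fun k => (tagged.filter (fun p => p.1 == k)).map Prod.snd), keys)

-- ===== PRECONDITION & SPEC =====
def pvPreSurvives (s : String) : Bool :=
  PySem.Str.isIn "WNet" s && PySem.Str.isIn "StyleHw50" s && PySem.Str.isIn "ContentUnKnown-StyleUnKnown" s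
def pvPreHasStyle (s : String) : Bool :=
  (List.range s.toList.length).any (fun (ii : Nat) =>
    PySem.Str.startswith (PySem.Str.slice s (some (ii : Int)) none) "Style" &&
    (match PySem.Str.pyGet? (PySem.Str.slice s (some (ii : Int)) (some ((ii : Int) + 7))) (-1) with
     | some c => PySem.Chars.isdigit c
     | none => false))
-- Pre_ excludes lists containing a filter-surviving name with no digit-terminated 'Style' marker:
-- there A raises UnboundLocalError (first such name) or silently reuses the stale style_info left
-- over from a previous iteration (leftover loop state), while B raises ValueError.
def Pre_find_real_exp_num (exp_list : List String) : Prop :=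
  ∀ e ∈ exp_list, pvPreSurvives e = true → pvPreHasStyle e = true
instance (exp_list : List String) : Decidable (Pre_find_real_exp_num exp_list) := by
  unfold Pre_find_real_exp_num; infer_instance
def pvWitness_find_real_exp_num : List String :=
  ["WNetStyleHw50ContentUnKnown-StyleUnKnownStyle01", "WNetStyleHw50ContentUnKnown-StyleUnKnownStyle02AAA"]

def Spec_find_real_exp_num (exp_list : List String) (out : List (List String) × List String) : Prop := out = find_real_exp_num_alt exp_list
instance (exp_list : List String) (out : List (List String) × List String) : Decidable (Spec_find_real_exp_num exp_list out) := by unfold Spec_find_real_exp_num; infer_instance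

-- ===== CLAIM (what is proved, stated in full; the proofs are below) =====
def Claim_equal_find_real_exp_num : Prop := ∀ (exp_list : List String), Dom_find_real_exp_num exp_list → Pre_find_real_exp_num exp_list → Spec_find_real_exp_num exp_list (find_real_exp_num exp_list)

-- ===== LEMMAS AND PROOFS =====

-- proof-side abbreviations for B's three stages
def pvKey (e : String) : String := (pvStyleKey? e).getD ""
def pvTag (l : List String) : List (String × String) :=
  (l.filter pvSurvives).map (fun e => (pvKey e, e))
def pvK (t : List (String × String)) : List String := PySem.List.dedup (t.map Prod.fst)
def pvG (t : List (String × String)) : List (List String) :=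
  (pvK t).map (fun k => (t.filter (fun p => p.1 == k)).map Prod.snd)

-- A's find-over-filtered-keyword-list is the fused single search
theorem pv_find_filter (n : Nat) (p q : Nat → Bool) :
    ((List.range n).filter p).find? q = (List.range n).find? (fun ii => p ii && q ii) := by
  rw [List.find?_filter]
  congr 1
  funext a; cases hp : p a <;> cases hq : q a <;> simp

theorem pv_findSome_if {α β : Type} (l : List α) (c : α → Bool) (f : α → β) :
    l.findSome? (fun a => if c a then some (f a) else none) = (l.find? c).map f := by
  induction l with
  | nil => rfl
  | cons a l ih =>
    by_cases h : c a = true <;> simp [h, ih]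

-- B's fused style search, in find?-map form matching A's computation
theorem pv_key_eq (e : String) :
    pvStyleKey? e = ((List.range e.toList.length).find? (fun (ii : Nat) =>
        PySem.Str.startswith (PySem.Str.slice e (some (ii : Int)) none) "Style" &&
        (match PySem.Str.pyGet? (PySem.Str.slice e (some (ii : Int)) (some ((ii : Int) + 7))) (-1) with
         | some c => PySem.Chars.isdigit c
         | none => false))).map
      (fun (ii : Nat) => PySem.Str.replace e (PySem.Str.slice e (some (ii : Int)) (some ((ii : Int) + 7))) "") := by
  rw [← pv_findSome_if]
  unfold pvStyleKey?
  congr 1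
  funext ii
  cases hp : PySem.Str.startswith (PySem.Str.slice e (some (ii : Int)) none) "Style"
  · simp
  · cases hg : PySem.Str.pyGet? (PySem.Str.slice e (some (ii : Int)) (some ((ii : Int) + 7))) (-1) with
    | none => simp
    | some c => cases hd : PySem.Chars.isdigit c <;> simp [hd]

-- dedup through a single append
theorem pv_dedup_append (xs : List String) (x : String) :
    PySem.List.dedup (xs ++ [x])
      = if (PySem.List.dedup xs).contains x then PySem.List.dedup xs else PySem.List.dedup xs ++ [x] := by
  simp only [PySem.List.dedup_eq_ofList, PySem.Set.ofList_eq_foldl, List.foldl_append, List.foldl_cons,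
    List.foldl_nil]
  rfl

theorem pv_mem_dedup (xs : List String) (x : String) : x ∈ PySem.List.dedup xs ↔ x ∈ xs := by
  simp [PySem.List.dedup_eq_ofList, PySem.Set.mem_ofList]

theorem pv_nodup_dedup (xs : List String) : (PySem.List.dedup xs).Nodup := by
  simp [PySem.List.dedup_eq_ofList, PySem.Set.nodup_ofList]

-- modify-at-index form of a per-key append over a nodup key list
theorem pv_map_modify (ks : List String) (g : String → List String) (m : String) (e : String)
    (hnd : ks.Nodup) (hm : m ∈ ks) :
    ∃ i, PySem.List.index? ks m = some i ∧
      ks.map (fun k => g k ++ if k = m then [e] else []) = (ks.map g).modify i (· ++ [e]) := by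
  induction ks with
  | nil => cases hm
  | cons k ks ih =>
    rcases List.nodup_cons.mp hnd with ⟨hk, hnd'⟩
    by_cases hkm : k = m
    · subst hkm
      refine ⟨0, ?_, ?_⟩
      · simp [PySem.List.index?, List.idxOf?, List.findIdx?_cons]
      · have hmap : ks.map (fun k' => g k' ++ if k' = k then [e] else []) = ks.map g := by
          apply List.map_congr_left
          intro a ha
          have : ¬ (a = k) := fun h => hk (h ▸ ha)
          simp [this]
        simp [List.map_cons, List.modify_zero_cons, hmap]
    · have hm' : m ∈ ks := by
        rcases List.mem_cons.mp hm with h | h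
        · exact absurd h.symm hkm
        · exact h
      rcases ih hnd' hm' with ⟨i, hi, hmap⟩
      refine ⟨i + 1, ?_, ?_⟩
      · have hb : (k == m) = false := by simpa using hkm
        simp only [PySem.List.index?, List.idxOf?] at hi ⊢
        simp [List.findIdx?_cons, hb, hi]
      · simp [List.map_cons, List.modify_succ_cons, hkm, hmap]

-- filter of t ++ [(m,e)] per key
theorem pv_filter_append (t : List (String × String)) (m e k : String) :
    ((t ++ [(m, e)]).filter (fun p => p.1 == k)).map Prod.snd
      = (t.filter (fun p => p.1 == k)).map Prod.snd ++ (if m = k then [e] else []) := by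
  by_cases h : m = k <;> simp [List.filter_append, h]

-- the B-side stages absorb one tagged survivor
theorem pv_stage_step (t : List (String × String)) (m e : String) :
    (pvG (t ++ [(m, e)]), pvK (t ++ [(m, e)]))
      = (if !((pvK t).contains m) then (pvG t ++ [[e]], pvK t ++ [m])
         else match PySem.List.index? (pvK t) m with
           | some i => ((pvG t).modify i (· ++ [e]), pvK t)
           | none => (pvG t, pvK t)) := by
  have hK : pvK (t ++ [(m, e)])
      = if (pvK t).contains m then pvK t else pvK t ++ [m] := by
    simp only [pvK, List.map_append, List.map_cons, List.map_nil]
    exact pv_dedup_append (t.map Prod.fst) m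
  by_cases hc : (pvK t).contains m = true
  · have hmem : m ∈ pvK t := by simpa [List.contains_eq_mem] using hc
    rcases pv_map_modify (pvK t) (fun k => (t.filter (fun p => p.1 == k)).map Prod.snd) m e
        (pv_nodup_dedup _) hmem with ⟨i, hi, hmap⟩
    have hG : pvG (t ++ [(m, e)]) = (pvG t).modify i (· ++ [e]) := by
      unfold pvG
      rw [hK, if_pos hc, ← hmap]
      apply List.map_congr_left
      intro k _
      rw [pv_filter_append]
      by_cases h : m = k
      · simp [h]
      · have h' : ¬ k = m := fun hh => h hh.symm
        simp [h, h']
    simp [hG, hK, hmem, show List.idxOf? m (pvK t) = some i from hi]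
  · have hnm : m ∉ pvK t := by
      intro h; exact hc (by simpa [List.contains_eq_mem] using h)
    have hnm' : m ∉ t.map Prod.fst := fun h => hnm ((pv_mem_dedup _ _).mpr h)
    have hG : pvG (t ++ [(m, e)]) = pvG t ++ [[e]] := by
      unfold pvG
      rw [hK, if_neg hc, List.map_append]
      congr 1
      · apply List.map_congr_left
        intro k hkmem
        rw [pv_filter_append]
        have : ¬ (m = k) := by
          intro h; exact hnm (h ▸ hkmem)
        simp [this]
      · have hfe : t.filter (fun p => p.1 == m) = [] := by
          apply List.filter_eq_nil_iff.mpr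
          intro p hp hpe
          exact hnm' (by
            have : p.1 = m := by simpa using hpe
            exact this ▸ List.mem_map_of_mem hp)
        simp [hfe]
    simp only [Bool.not_eq_true] at hc
    simp [hG, hK, hnm]

-- main loop invariant: A's fold over the remaining names, started from B's stages of the
-- already-tagged prefix t, lands on B's stages of the full tagged list
theorem pv_main (l : List String) : ∀ (t : List (String × String)) (s : Option String),
    (∀ e ∈ l, pvSurvives e = true → (pvStyleKey? e).isSome = true) →
    (l.foldl pvStepA ((pvG t, pvK t), s)).1 = (pvG (t ++ pvTag l), pvK (t ++ pvTag l)) := by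
  induction l with
  | nil => intro t s _; simp [pvTag]
  | cons e l ih =>
    intro t s hpre
    by_cases hf : pvSurvives e = true
    · have hsome := hpre e (List.mem_cons_self) hf
      rw [pv_key_eq] at hsome
      cases hF : (List.range e.toList.length).find? (fun (ii : Nat) =>
          PySem.Str.startswith (PySem.Str.slice e (some (ii : Int)) none) "Style" &&
          (match PySem.Str.pyGet? (PySem.Str.slice e (some (ii : Int)) (some ((ii : Int) + 7))) (-1) with
           | some c => PySem.Chars.isdigit c
           | none => false)) with
      | none => rw [hF] at hsome; simp at hsome
      | some kk =>
        have hm : pvKey e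
            = PySem.Str.replace e (PySem.Str.slice e (some (kk : Int)) (some ((kk : Int) + 7))) "" := by
          unfold pvKey
          rw [pv_key_eq, hF]
          rfl
        have hstep : pvStepA ((pvG t, pvK t), s) e
            = ((pvG (t ++ [(pvKey e, e)]), pvK (t ++ [(pvKey e, e)])),
               some (PySem.Str.slice e (some (kk : Int)) (some ((kk : Int) + 7)))) := by
          have hc' : (PySem.Str.isIn "WNet" e && PySem.Str.isIn "StyleHw50" e
              && PySem.Str.isIn "ContentUnKnown-StyleUnKnown" e) = true := hf
          simp only [pvStepA, hc', Bool.not_true, Bool.false_eq_true, if_false]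
          rw [pv_find_filter, hF]
          simp only [← hm, pv_stage_step t (pvKey e) e]
          by_cases hc : (pvK t).contains (pvKey e) = true
          · cases hi : PySem.List.index? (pvK t) (pvKey e) with
            | none =>
              exfalso
              have hmem : pvKey e ∈ pvK t := by simpa [List.contains_eq_mem] using hc
              rcases pv_map_modify (pvK t) (fun _ => []) (pvKey e) e (pv_nodup_dedup _) hmem with
                ⟨i, hi', _⟩
              rw [hi] at hi'; cases hi'
            | some i => split_ifs <;> rfl
          · simp only [Bool.not_eq_true] at hc
            have hnm : pvKey e ∉ pvK t := fun h => by
              simp [h] at hc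
            simp [hnm]
        rw [List.foldl_cons, hstep]
        have htag : pvTag (e :: l) = (pvKey e, e) :: pvTag l := by
          simp [pvTag, hf]
        rw [htag]
        have h2 : t ++ (pvKey e, e) :: pvTag l = (t ++ [(pvKey e, e)]) ++ pvTag l := by simp
        rw [h2]
        exact ih (t ++ [(pvKey e, e)]) _ (fun e' he' hs => hpre e' (List.mem_cons_of_mem _ he') hs)
    · have hstep : pvStepA ((pvG t, pvK t), s) e = ((pvG t, pvK t), s) := by
        have hc' : (PySem.Str.isIn "WNet" e && PySem.Str.isIn "StyleHw50" e
            && PySem.Str.isIn "ContentUnKnown-StyleUnKnown" e) = false :=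
          Bool.eq_false_iff.mpr (fun h => hf h)
        simp only [pvStepA, hc', Bool.not_false, if_true]
      have htag : pvTag (e :: l) = pvTag l := by
        simp [pvTag, hf]
      rw [List.foldl_cons, hstep, htag]
      exact ih t s (fun e' he' hs => hpre e' (List.mem_cons_of_mem _ he') hs)

-- Pre_'s per-element condition gives B a key on every survivor
theorem pv_pre_some (e : String) (h : pvPreHasStyle e = true) : (pvStyleKey? e).isSome = true := by
  rw [pv_key_eq, Option.isSome_map]
  unfold pvPreHasStyle at h
  rw [List.any_eq_true] at h
  rcases h with ⟨ii, hii, hcond⟩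
  rw [List.find?_isSome]
  exact ⟨ii, hii, hcond⟩

-- ===== VERDICT (by name: the statement is the Claim_ definition above) =====
theorem find_real_exp_num_spec : Claim_equal_find_real_exp_num := by
  intro l _ hpre
  unfold Spec_find_real_exp_num
  have h := pv_main l [] none (fun e he hs => pv_pre_some e (hpre e he hs))
  have h0G : pvG ([] : List (String × String)) = [] := rfl
  have h0K : pvK ([] : List (String × String)) = [] := rfl
  rw [h0G, h0K] at h
  unfold find_real_exp_num
  rw [show (([] : List (List String)), ([] : List String)) = (pvG [], pvK []) from rfl] at h ⊢
  rw [h]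
  simp [find_real_exp_num_alt, pvG, pvK, pvTag, pvKey]
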